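-- pv_equiv track=rewrite | github.com/PPAT132/SEOAgent | backend/app/core/lhr_parser.py | _find_safe_insertion_position
-- ===== SOURCE A (Python) =====
-- def _find_safe_insertion_position(html_content: str, issue_type: str) -> int:
--     """Find safe insertion position for different issue types"""
--     lines = html_content.split('\n')
--
--     if issue_type == "meta-description":
--         # Strategy 1: Insert after </title>
--         for i, line in enumerate(lines):
--             if '</title>' in line:
--                 return -(i + 2)  # Insert on next line
--
--         # Strategy 2: If no title, insert after <head>
--         for i, line in enumerate(lines):
--             if '<head>' in line:
--                 return -(i + 2)
--
--         # Strategy 3: If neither exists, insert at document beginning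
--         return -1
--
--     elif issue_type == "hreflang":
--         # Insert in <head> tag, near meta tags
--         for i, line in enumerate(lines):
--             if '<meta' in line:
--                 return -(i + 2)
--
--         # If no meta tags, insert after head
--         for i, line in enumerate(lines):
--             if '<head>' in line:
--                 return -(i + 2)
--
--         return -1
--
--     elif issue_type == "canonical":
--         # Insert in <head> tag
--         for i, line in enumerate(lines):
--             if '<head>' in line:
--                 return -(i + 2)
--
--         return -1
--
--     elif issue_type.startswith("og:"):
--         # Insert in <head> tag, near other meta tags
--         for i, line in enumerate(lines):
--             if '<meta' in line:
--                 return -(i + 2)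
--
--         for i, line in enumerate(lines):
--             if '<head>' in line:
--                 return -(i + 2)
--
--         return -1
--
--     elif issue_type == "viewport":
--         # Insert in <head> tag, near other meta tags
--         for i, line in enumerate(lines):
--             if '<meta' in line:
--                 return -(i + 2)
--
--         for i, line in enumerate(lines):
--             if '<head>' in line:
--                 return -(i + 2)
--
--         return -1
--
--     elif issue_type == "charset":
--         # Insert at the very beginning of <head>
--         for i, line in enumerate(lines):
--             if '<head>' in line:
--                 return -(i + 2)
--
--         return -1
--
--     elif issue_type == "language":
--         # Insert in <html> tag
--         for i, line in enumerate(lines):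
--             if '<html' in line:
--                 return -(i + 1)  # Insert on same line
--
--         return -1
--
--     # Default: insert at beginning
--     return -1
-- ===== SOURCE B (Python) =====
-- _TARGETS = {
--     "meta-description": [('</title>', 2), ('<head>', 2)],
--     "hreflang": [('<meta', 2), ('<head>', 2)],
--     "viewport": [('<meta', 2), ('<head>', 2)],
--     "canonical": [('<head>', 2)],
--     "charset": [('<head>', 2)],
--     "language": [('<html', 1)],
-- }
--
--
-- def _find_safe_insertion_position(html_content: str, issue_type: str) -> int:
--     """Single pass over the lines: track the lexicographically smallest
--     (target-priority, line-index) match, then turn it into a position."""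
--     if issue_type.startswith("og:"):
--         targets = [('<meta', 2), ('<head>', 2)]
--     else:
--         targets = _TARGETS.get(issue_type, [])
--     best = None  # (priority, line index) of the best match seen so far
--     for i, line in enumerate(html_content.split('\n')):
--         for p, (sub, _) in enumerate(targets):
--             if sub in line and (best is None or (p, i) < best):
--                 best = (p, i)
--     if best is None:
--         return -1
--     p, i = best
--     return -(i + targets[p][1])
-- ===== Notes on version B (the rewrite author's own statement) =====
-- stated objective: alternative
-- what changed: Instead of A's staged full rescans of the lines (one loop per fallback target per issue type), B makes a SINGLE pass over the lines, tracking the lexicographically smallest (target-priority, line-index) match for the issue type's target list, and converts that minimum into the returned position at the end.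
import Mathlib
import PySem

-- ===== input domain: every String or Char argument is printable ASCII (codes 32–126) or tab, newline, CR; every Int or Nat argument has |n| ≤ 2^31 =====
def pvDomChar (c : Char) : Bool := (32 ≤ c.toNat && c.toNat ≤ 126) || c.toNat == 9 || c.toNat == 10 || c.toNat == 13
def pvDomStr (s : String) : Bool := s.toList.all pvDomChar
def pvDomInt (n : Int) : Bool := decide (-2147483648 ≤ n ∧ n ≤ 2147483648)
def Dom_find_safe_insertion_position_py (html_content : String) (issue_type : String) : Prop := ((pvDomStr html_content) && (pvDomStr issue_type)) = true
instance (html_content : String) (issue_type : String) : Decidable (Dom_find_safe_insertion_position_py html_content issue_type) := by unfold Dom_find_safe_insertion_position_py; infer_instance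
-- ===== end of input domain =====

-- B replaces A's staged per-target rescans by ONE pass over the lines that tracks the
-- lexicographically smallest (target-priority, line-index) match (objective: alternative).

-- ===== PORT A =====
-- 'for i, line in enumerate(lines): if sub in line: return -(i + off)' — none if no line matches
def pvScanA (lines : List String) (i : Nat) (sub : String) (off : Int) : Option Int :=
  match lines with
  | [] => none
  | l :: rest =>
    if PySem.Str.isIn sub l then some (-((i : Int) + off)) else pvScanA rest (i + 1) sub off

def find_safe_insertion_position_py (html_content : String) (issue_type : String) : Int :=
  let lines := (PySem.Str.split? html_content "\n").getD []
  if issue_type = "meta-description" then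
    match pvScanA lines 0 "</title>" 2 with
    | some r => r
    | none =>
      match pvScanA lines 0 "<head>" 2 with
      | some r => r
      | none => -1
  else if issue_type = "hreflang" then
    match pvScanA lines 0 "<meta" 2 with
    | some r => r
    | none =>
      match pvScanA lines 0 "<head>" 2 with
      | some r => r
      | none => -1
  else if issue_type = "canonical" then
    match pvScanA lines 0 "<head>" 2 with
    | some r => r
    | none => -1
  else if PySem.Str.startswith issue_type "og:" then
    match pvScanA lines 0 "<meta" 2 with
    | some r => r
    | none =>
      match pvScanA lines 0 "<head>" 2 with
      | some r => r
      | none => -1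
  else if issue_type = "viewport" then
    match pvScanA lines 0 "<meta" 2 with
    | some r => r
    | none =>
      match pvScanA lines 0 "<head>" 2 with
      | some r => r
      | none => -1
  else if issue_type = "charset" then
    match pvScanA lines 0 "<head>" 2 with
    | some r => r
    | none => -1
  else if issue_type = "language" then
    match pvScanA lines 0 "<html" 1 with
    | some r => r
    | none => -1
  else
    -1

-- ===== PORT B =====
-- the dispatch table: issue_type ↦ ordered (substring, offset) search targets
def pvTargets (issue_type : String) : List (String × Int) :=
  if PySem.Str.startswith issue_type "og:" then [("<meta", 2), ("<head>", 2)]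
  else
    (PySem.Dict.ofList
      [("meta-description", [("</title>", (2 : Int)), ("<head>", 2)]),
       ("hreflang", [("<meta", 2), ("<head>", 2)]),
       ("viewport", [("<meta", 2), ("<head>", 2)]),
       ("canonical", [("<head>", 2)]),
       ("charset", [("<head>", 2)]),
       ("language", [("<html", 1)])]).getD issue_type []

-- Python's '(p, i) < best' tuple comparison (best is None ↔ always smaller)
def pvLtB (c : Int × Int) : Option (Int × Int) → Bool
  | none => true
  | some b => c.1 < b.1 || (c.1 == b.1 && c.2 < b.2)

-- the single pass: 'for i, line in enumerate(lines): for p, (sub, _) in enumerate(targets):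
--   if sub in line and (best is None or (p, i) < best): best = (p, i)'
def pvFold (targets : List (String × Int)) (lines : List String) : Option (Int × Int) :=
  (PySem.List.enumerate lines 0).foldl
    (fun best il =>
      (PySem.List.enumerate targets 0).foldl
        (fun b pt =>
          if PySem.Str.isIn pt.2.1 il.2 && pvLtB (pt.1, il.1) b then some (pt.1, il.1) else b)
        best)
    none

-- 'if best is None: return -1 ; p, i = best ; return -(i + targets[p][1])'
-- (pyGet? is always some here since p indexes targets; the none arm only makes the match total)
def pvFinish (targets : List (String × Int)) : Option (Int × Int) → Int
  | none => -1
  | some (p, i) =>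
    match PySem.List.pyGet? targets p with
    | some t => -(i + t.2)
    | none => -1

def find_safe_insertion_position_py_alt (html_content : String) (issue_type : String) : Int :=
  pvFinish (pvTargets issue_type)
    (pvFold (pvTargets issue_type) ((PySem.Str.split? html_content "\n").getD []))

-- ===== PRECONDITION & SPEC =====
def Spec_find_safe_insertion_position_py (html_content : String) (issue_type : String) (out : Int) : Prop := out = find_safe_insertion_position_py_alt html_content issue_type
instance (html_content : String) (issue_type : String) (out : Int) : Decidable (Spec_find_safe_insertion_position_py html_content issue_type out) := by unfold Spec_find_safe_insertion_position_py; infer_instance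

-- ===== CLAIM (what is proved, stated in full; the proofs are below) =====
def Claim_equal_find_safe_insertion_position_py : Prop := ∀ (html_content : String) (issue_type : String), Dom_find_safe_insertion_position_py html_content issue_type → Spec_find_safe_insertion_position_py html_content issue_type (find_safe_insertion_position_py html_content issue_type)

-- ===== LEMMAS AND PROOFS =====

-- lexicographic minimum on Option (Int × Int) (none = no match yet / +∞), keeping the left on ties
def pvOmin : Option (Int × Int) → Option (Int × Int) → Option (Int × Int)
  | none, c => c
  | b, none => b
  | some b, some c => if pvLtB c (some b) then some c else some b

lemma pvOmin_none_right (b : Option (Int × Int)) : pvOmin b none = b := by cases b <;> rfl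

lemma pvOmin_assoc (a b c : Option (Int × Int)) :
    pvOmin (pvOmin a b) c = pvOmin a (pvOmin b c) := by
  obtain _ | ⟨a1, a2⟩ := a <;> obtain _ | ⟨b1, b2⟩ := b <;> obtain _ | ⟨c1, c2⟩ := c <;>
    simp only [pvOmin, pvLtB, Bool.or_eq_true, Bool.and_eq_true, decide_eq_true_eq,
      beq_iff_eq] <;>
    split_ifs <;>
    simp only [pvOmin, Bool.or_eq_true, Bool.and_eq_true] <;>
    split_ifs <;>
    first
      | rfl
      | (simp only [Option.some.injEq, Prod.mk.injEq]; omega)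

lemma pvStep_eq (g : Bool) (c : Int × Int) (b : Option (Int × Int)) :
    (if g && pvLtB c b then some c else b) = pvOmin b (if g then some c else none) := by
  cases g <;> cases b <;> simp [pvOmin, pvLtB]

-- a single line's contribution to the minimum, for a 2-target and a 1-target list
lemma pvInner2 (s1 s2 : String) (o1 o2 : Int) (line : String) (i : Int)
    (b : Option (Int × Int)) :
    (PySem.List.enumerate [(s1, o1), (s2, o2)] 0).foldl
        (fun b pt =>
          if PySem.Str.isIn pt.2.1 line && pvLtB (pt.1, i) b then some (pt.1, i) else b) b
      = pvOmin b (if PySem.Str.isIn s1 line then some (0, i)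
                  else if PySem.Str.isIn s2 line then some (1, i) else none) := by
  simp only [PySem.List.enumerate_cons, PySem.List.enumerate_nil, List.foldl]
  rw [pvStep_eq, pvStep_eq, pvOmin_assoc]
  congr 1
  cases h1 : PySem.Str.isIn s1 line <;> cases h2 : PySem.Str.isIn s2 line <;>
    simp [pvOmin, pvLtB]

lemma pvInner1 (s1 : String) (o1 : Int) (line : String) (i : Int)
    (b : Option (Int × Int)) :
    (PySem.List.enumerate [(s1, o1)] 0).foldl
        (fun b pt =>
          if PySem.Str.isIn pt.2.1 line && pvLtB (pt.1, i) b then some (pt.1, i) else b) b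
      = pvOmin b (if PySem.Str.isIn s1 line then some (0, i) else none) := by
  simp only [PySem.List.enumerate_cons, PySem.List.enumerate_nil, List.foldl]
  rw [pvStep_eq]

-- what the single pass computes, characterised by findIdx? per target
def pvSpec1 (s1 : String) (lines : List String) (start : Int) : Option (Int × Int) :=
  (lines.findIdx? (fun l => PySem.Str.isIn s1 l)).map (fun j => (0, start + (j : Int)))

def pvSpec2 (s1 s2 : String) (lines : List String) (start : Int) : Option (Int × Int) :=
  match lines.findIdx? (fun l => PySem.Str.isIn s1 l) with
  | some j => some (0, start + (j : Int))
  | none => (lines.findIdx? (fun l => PySem.Str.isIn s2 l)).map (fun j => (1, start + (j : Int)))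

lemma pvSpec2_cons (s1 s2 : String) (l : String) (rest : List String) (start : Int) :
    pvOmin (if PySem.Str.isIn s1 l then some (0, start)
            else if PySem.Str.isIn s2 l then some (1, start) else none)
           (pvSpec2 s1 s2 rest (start + 1))
      = pvSpec2 s1 s2 (l :: rest) start := by
  unfold pvSpec2
  rw [List.findIdx?_cons, List.findIdx?_cons]
  cases h1 : PySem.Str.isIn s1 l <;> cases h2 : PySem.Str.isIn s2 l <;>
    cases hf1 : rest.findIdx? (fun l => PySem.Str.isIn s1 l) <;>
    cases hf2 : rest.findIdx? (fun l => PySem.Str.isIn s2 l) <;>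
      simp [pvOmin, pvLtB] <;> omega

lemma pvSpec1_cons (s1 : String) (l : String) (rest : List String) (start : Int) :
    pvOmin (if PySem.Str.isIn s1 l then some (0, start) else none)
           (pvSpec1 s1 rest (start + 1))
      = pvSpec1 s1 (l :: rest) start := by
  unfold pvSpec1
  rw [List.findIdx?_cons]
  cases h1 : PySem.Str.isIn s1 l <;>
    cases hf1 : rest.findIdx? (fun l => PySem.Str.isIn s1 l) <;>
      simp [pvOmin, pvLtB] <;> omega

lemma pvOuter2 (s1 s2 : String) (o1 o2 : Int) :
    ∀ (lines : List String) (start : Int) (b : Option (Int × Int)),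
      (PySem.List.enumerate lines start).foldl
          (fun best il =>
            (PySem.List.enumerate [(s1, o1), (s2, o2)] 0).foldl
              (fun b pt =>
                if PySem.Str.isIn pt.2.1 il.2 && pvLtB (pt.1, il.1) b then some (pt.1, il.1)
                else b)
              best)
          b
        = pvOmin b (pvSpec2 s1 s2 lines start) := by
  intro lines
  induction lines with
  | nil => intro start b; simp [PySem.List.enumerate_nil, pvSpec2, pvOmin_none_right]
  | cons l rest ih =>
    intro start b
    rw [show PySem.List.enumerate (l :: rest) start = (start, l) :: PySem.List.enumerate rest (start + 1) from by
        simp [PySem.List.enumerate_cons],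
      List.foldl_cons, ih, pvInner2, pvOmin_assoc, pvSpec2_cons]

lemma pvOuter1 (s1 : String) (o1 : Int) :
    ∀ (lines : List String) (start : Int) (b : Option (Int × Int)),
      (PySem.List.enumerate lines start).foldl
          (fun best il =>
            (PySem.List.enumerate [(s1, o1)] 0).foldl
              (fun b pt =>
                if PySem.Str.isIn pt.2.1 il.2 && pvLtB (pt.1, il.1) b then some (pt.1, il.1)
                else b)
              best)
          b
        = pvOmin b (pvSpec1 s1 lines start) := by
  intro lines
  induction lines with
  | nil => intro start b; simp [PySem.List.enumerate_nil, pvSpec1, pvOmin_none_right]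
  | cons l rest ih =>
    intro start b
    rw [show PySem.List.enumerate (l :: rest) start = (start, l) :: PySem.List.enumerate rest (start + 1) from by
        simp [PySem.List.enumerate_cons],
      List.foldl_cons, ih, pvInner1, pvOmin_assoc, pvSpec1_cons]

lemma pvFold2 (s1 s2 : String) (o1 o2 : Int) (lines : List String) :
    pvFold [(s1, o1), (s2, o2)] lines = pvSpec2 s1 s2 lines 0 := by
  unfold pvFold; rw [pvOuter2]; rfl

lemma pvFold1 (s1 : String) (o1 : Int) (lines : List String) :
    pvFold [(s1, o1)] lines = pvSpec1 s1 lines 0 := by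
  unfold pvFold; rw [pvOuter1]; rfl

-- A's staged scans give pvScanA = findIdx?
lemma pvScanA_eq_findIdx (lines : List String) (sub : String) (off : Int) :
    ∀ i : Nat, pvScanA lines i sub off
      = (lines.findIdx? (fun l => PySem.Str.isIn sub l)).map (fun j => -(((i + j : Nat) : Int) + off)) := by
  induction lines with
  | nil => intro i; rfl
  | cons l rest ih =>
    intro i
    simp only [pvScanA, List.findIdx?_cons, PySem.Str.isIn_eq]
    by_cases h : PySem.Chars.isIn sub.toList l.toList = true
    · simp [h]
    · simp only [h, Bool.false_eq_true, not_false_eq_true, if_neg, ih (i + 1), Option.map_map,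
        PySem.Str.isIn_eq]
      cases hf : rest.findIdx? (fun l => PySem.Chars.isIn sub.toList l.toList)
      · simp
      · simp [Function.comp]; omega

-- the two shapes agree
lemma pvEq2 (lines : List String) (s1 s2 : String) (o1 o2 : Int) :
    (match pvScanA lines 0 s1 o1 with
     | some r => r
     | none =>
       match pvScanA lines 0 s2 o2 with
       | some r => r
       | none => -1)
      = pvFinish [(s1, o1), (s2, o2)] (pvSpec2 s1 s2 lines 0) := by
  rw [pvScanA_eq_findIdx, pvScanA_eq_findIdx]
  unfold pvSpec2
  cases hf1 : lines.findIdx? (fun l => PySem.Str.isIn s1 l) <;>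
    cases hf2 : lines.findIdx? (fun l => PySem.Str.isIn s2 l) <;>
      simp [pvFinish, PySem.List.pyGet?, PySem.List.pyIdx?]

lemma pvEq1 (lines : List String) (s1 : String) (o1 : Int) :
    (match pvScanA lines 0 s1 o1 with
     | some r => r
     | none => -1)
      = pvFinish [(s1, o1)] (pvSpec1 s1 lines 0) := by
  rw [pvScanA_eq_findIdx]
  unfold pvSpec1
  cases hf1 : lines.findIdx? (fun l => PySem.Str.isIn s1 l) <;>
    simp [pvFinish, PySem.List.pyGet?, PySem.List.pyIdx?]

-- ===== VERDICT (by name: the statement is the Claim_ definition above) =====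
theorem find_safe_insertion_position_py_spec : Claim_equal_find_safe_insertion_position_py := by
  intro html_content issue_type _
  unfold Spec_find_safe_insertion_position_py find_safe_insertion_position_py
    find_safe_insertion_position_py_alt pvTargets
  by_cases h1 : issue_type = "meta-description"
  · subst h1
    simp only [String.reduceEq,
      show PySem.Str.startswith "meta-description" "og:" = false from by decide,
      Bool.false_eq_true, if_false, if_true,
      show (PySem.Dict.ofList
      [("meta-description", [("</title>", (2 : Int)), ("<head>", 2)]),
       ("hreflang", [("<meta", 2), ("<head>", 2)]),
       ("viewport", [("<meta", 2), ("<head>", 2)]),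
       ("canonical", [("<head>", 2)]),
       ("charset", [("<head>", 2)]),
       ("language", [("<html", 1)])]).getD "meta-description" [] = [("</title>", (2 : Int)), ("<head>", 2)] from by decide]
    rw [pvFold2, ← pvEq2]
  by_cases h2 : issue_type = "hreflang"
  · subst h2
    simp only [String.reduceEq, show ("hreflang" : String) ≠ "meta-description" from by decide,
      show PySem.Str.startswith "hreflang" "og:" = false from by decide,
      Bool.false_eq_true, if_false, if_true,
      show (PySem.Dict.ofList
      [("meta-description", [("</title>", (2 : Int)), ("<head>", 2)]),
       ("hreflang", [("<meta", 2), ("<head>", 2)]),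
       ("viewport", [("<meta", 2), ("<head>", 2)]),
       ("canonical", [("<head>", 2)]),
       ("charset", [("<head>", 2)]),
       ("language", [("<html", 1)])]).getD "hreflang" [] = [("<meta", (2 : Int)), ("<head>", 2)] from by decide]
    rw [pvFold2, ← pvEq2]
  by_cases h3 : issue_type = "canonical"
  · subst h3
    simp only [String.reduceEq, show ("canonical" : String) ≠ "meta-description" from by decide,
      show ("canonical" : String) ≠ "hreflang" from by decide,
      show PySem.Str.startswith "canonical" "og:" = false from by decide,
      Bool.false_eq_true, if_false, if_true,
      show (PySem.Dict.ofList
      [("meta-description", [("</title>", (2 : Int)), ("<head>", 2)]),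
       ("hreflang", [("<meta", 2), ("<head>", 2)]),
       ("viewport", [("<meta", 2), ("<head>", 2)]),
       ("canonical", [("<head>", 2)]),
       ("charset", [("<head>", 2)]),
       ("language", [("<html", 1)])]).getD "canonical" [] = [("<head>", (2 : Int))] from by decide]
    rw [pvFold1, ← pvEq1]
  by_cases h4 : PySem.Str.startswith issue_type "og:" = true
  · simp only [h1, h2, h3, h4, if_false, if_true]
    rw [pvFold2, ← pvEq2]
  by_cases h5 : issue_type = "viewport"
  · subst h5
    simp only [String.reduceEq, show ("viewport" : String) ≠ "meta-description" from by decide,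
      show ("viewport" : String) ≠ "hreflang" from by decide,
      show ("viewport" : String) ≠ "canonical" from by decide,
      show PySem.Str.startswith "viewport" "og:" = false from by decide,
      Bool.false_eq_true, if_false, if_true,
      show (PySem.Dict.ofList
      [("meta-description", [("</title>", (2 : Int)), ("<head>", 2)]),
       ("hreflang", [("<meta", 2), ("<head>", 2)]),
       ("viewport", [("<meta", 2), ("<head>", 2)]),
       ("canonical", [("<head>", 2)]),
       ("charset", [("<head>", 2)]),
       ("language", [("<html", 1)])]).getD "viewport" [] = [("<meta", (2 : Int)), ("<head>", 2)] from by decide]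
    rw [pvFold2, ← pvEq2]
  by_cases h6 : issue_type = "charset"
  · subst h6
    simp only [String.reduceEq, show ("charset" : String) ≠ "meta-description" from by decide,
      show ("charset" : String) ≠ "hreflang" from by decide,
      show ("charset" : String) ≠ "canonical" from by decide,
      show PySem.Str.startswith "charset" "og:" = false from by decide,
      Bool.false_eq_true, if_false, if_true,
      show (PySem.Dict.ofList
      [("meta-description", [("</title>", (2 : Int)), ("<head>", 2)]),
       ("hreflang", [("<meta", 2), ("<head>", 2)]),
       ("viewport", [("<meta", 2), ("<head>", 2)]),
       ("canonical", [("<head>", 2)]),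
       ("charset", [("<head>", 2)]),
       ("language", [("<html", 1)])]).getD "charset" [] = [("<head>", (2 : Int))] from by decide]
    rw [pvFold1, ← pvEq1]
  by_cases h7 : issue_type = "language"
  · subst h7
    simp only [String.reduceEq, show ("language" : String) ≠ "meta-description" from by decide,
      show ("language" : String) ≠ "hreflang" from by decide,
      show ("language" : String) ≠ "canonical" from by decide,
      show PySem.Str.startswith "language" "og:" = false from by decide,
      Bool.false_eq_true, if_false, if_true,
      show (PySem.Dict.ofList
      [("meta-description", [("</title>", (2 : Int)), ("<head>", 2)]),
       ("hreflang", [("<meta", 2), ("<head>", 2)]),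
       ("viewport", [("<meta", 2), ("<head>", 2)]),
       ("canonical", [("<head>", 2)]),
       ("charset", [("<head>", 2)]),
       ("language", [("<html", 1)])]).getD "language" [] = [("<html", (1 : Int))] from by decide]
    rw [pvFold1, ← pvEq1]
  -- default: unknown issue_type, both return -1
  simp only [h1, h2, h3, h4, h5, h6, h7, if_false, Bool.false_eq_true]
  rw [show PySem.Dict.ofList
      [("meta-description", [("</title>", (2 : Int)), ("<head>", 2)]),
       ("hreflang", [("<meta", 2), ("<head>", 2)]),
       ("viewport", [("<meta", 2), ("<head>", 2)]),
       ("canonical", [("<head>", 2)]),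
       ("charset", [("<head>", 2)]),
       ("language", [("<html", 1)])]
    = PySem.Dict.mk
      [("meta-description", [("</title>", (2 : Int)), ("<head>", 2)]),
       ("hreflang", [("<meta", 2), ("<head>", 2)]),
       ("viewport", [("<meta", 2), ("<head>", 2)]),
       ("canonical", [("<head>", 2)]),
       ("charset", [("<head>", 2)]),
       ("language", [("<html", 1)])] from by decide]
  simp [PySem.Dict.getD_eq_get?_getD, beq_iff_eq, PySem.Dict.get?,
    Ne.symm h1, Ne.symm h2, Ne.symm h3, Ne.symm h5, Ne.symm h6, Ne.symm h7,
    pvFold, pvFinish, PySem.List.enumerate_nil]
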